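-- pv_equiv track=rewrite | github.com/sumi-0011/algo | 프로그래머스/lv2/17686. ［3차］ 파일명 정렬/［3차］ 파일명 정렬.py | getHeadAndNumber
-- ===== SOURCE A (Python) =====
-- def getHeadAndNumber(s):
--
--     headIdx = -1
--     numbers = ''
--
--     nFlag = False
--     for idx in range(len(s)):
--         # 문자인 경우, 이전에 숫자가 있었으면 tail 부분임
--         if not s[idx].isdigit() and nFlag:
--             break
--         # 숫자인 경우, 이전이 숫자가 아니면 head
--         if(s[idx].isdigit()) and not nFlag:
--             headIdx = idx
--             nFlag = True
--         # 숫자인 경우, 이전이 숫자이면 연결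
--         if s[idx].isdigit():
--             numbers += s[idx]
--     head = s[0:headIdx]
--     return head, int(numbers)
-- ===== SOURCE B (Python) =====
-- def getHeadAndNumber(s):
--     chars = list(s)
--     head = []
--     while chars and not chars[0].isdigit():
--         head.append(chars.pop(0))
--     num = []
--     while chars and chars[0].isdigit():
--         num.append(chars.pop(0))
--     return ''.join(head), int(''.join(num))
-- ===== Notes on version B (the rewrite author's own statement) =====
-- stated objective: simpler
-- what changed: Replaces A's single index loop with headIdx/nFlag state machine, break and final slice by two structural spans: peel the leading non-digit head, then the digit run; no flag, index or slice is maintained.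
-- outside the precondition, e.g. on getHeadAndNumber(''): A raises ValueError, B raises ValueError; on getHeadAndNumber('abc'): A raises ValueError, B raises ValueError
import Mathlib
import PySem

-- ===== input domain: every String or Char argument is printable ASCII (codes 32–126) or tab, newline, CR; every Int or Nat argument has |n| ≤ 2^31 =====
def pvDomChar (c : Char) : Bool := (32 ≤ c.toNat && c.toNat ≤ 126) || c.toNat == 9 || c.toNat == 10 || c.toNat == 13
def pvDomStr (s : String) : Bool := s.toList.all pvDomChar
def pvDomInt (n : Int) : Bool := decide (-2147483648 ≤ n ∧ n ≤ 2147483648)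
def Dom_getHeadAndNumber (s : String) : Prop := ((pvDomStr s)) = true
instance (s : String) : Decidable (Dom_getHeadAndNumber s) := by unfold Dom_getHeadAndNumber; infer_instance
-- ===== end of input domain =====

-- B replaces A's flag-driven index loop (break/state machine) with two structural
-- spans: peel the non-digit head, then the digit run (objective: simpler).
-- Pythons' str.isdigit on a single char is Char.isDigit — exact on the ASCII domain.

-- ===== PORT A =====
-- state: (headIdx, numbers, nFlag); 'break' returns the state; idx tracks range(len(s))
def pvALoop : List Char → Int → List Char → Bool → Int → Int × List Char
  | [], headIdx, numbers, _, _ => (headIdx, numbers)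
  | c :: rest, headIdx, numbers, nFlag, idx =>
    if !c.isDigit && nFlag then (headIdx, numbers)          -- break
    else
      let p : Int × Bool := if c.isDigit && !nFlag then (idx, true) else (headIdx, nFlag)
      let numbers' := if c.isDigit then numbers ++ [c] else numbers
      pvALoop rest p.1 numbers' p.2 (idx + 1)

def getHeadAndNumber (s : String) : String × Int :=
  let r := pvALoop s.toList (-1) [] false 0
  let head := PySem.List.slice s.toList (some 0) (some r.1)   -- s[0:headIdx]
  (String.ofList head, (PySem.Int.ofChars? r.2).getD 0)           -- int(numbers); none = ValueError, excluded by Pre_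

-- ===== PORT B =====
-- while chars and not chars[0].isdigit(): head.append(chars.pop(0))
def pvSpanHead : List Char → List Char × List Char
  | [] => ([], [])
  | c :: rest =>
    if !c.isDigit then
      let r := pvSpanHead rest
      (c :: r.1, r.2)
    else ([], c :: rest)

-- while chars and chars[0].isdigit(): num.append(chars.pop(0))
def pvSpanNum : List Char → List Char
  | [] => []
  | c :: rest => if c.isDigit then c :: pvSpanNum rest else []

def getHeadAndNumber_alt (s : String) : String × Int :=
  let p := pvSpanHead s.toList
  (String.ofList p.1, (PySem.Int.ofChars? (pvSpanNum p.2)).getD 0)  -- int(''.join(num)); ValueError excluded by Pre_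

-- ===== PRECONDITION & SPEC =====
-- A (and B) raise ValueError (int('')) exactly when s contains no digit; Pre_ excludes those.
def Pre_getHeadAndNumber (s : String) : Prop := s.toList.any Char.isDigit = true
instance (s : String) : Decidable (Pre_getHeadAndNumber s) := by unfold Pre_getHeadAndNumber; infer_instance
def pvWitness_getHeadAndNumber : String := "img12.png"

def Spec_getHeadAndNumber (s : String) (out : String × Int) : Prop := out = getHeadAndNumber_alt s
instance (s : String) (out : String × Int) : Decidable (Spec_getHeadAndNumber s out) := by unfold Spec_getHeadAndNumber; infer_instance

-- ===== CLAIM (what is proved, stated in full; the proofs are below) =====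
def Claim_equal_getHeadAndNumber : Prop := ∀ (s : String), Dom_getHeadAndNumber s → Pre_getHeadAndNumber s → Spec_getHeadAndNumber s (getHeadAndNumber s)

-- ===== LEMMAS AND PROOFS =====

-- once nFlag is set, A only accumulates the digit run and keeps headIdx
lemma pvALoop_true (cs : List Char) : ∀ (hI : Int) (num : List Char) (idx : Int),
    pvALoop cs hI num true idx = (hI, num ++ pvSpanNum cs) := by
  induction cs with
  | nil => intro hI num idx; simp [pvALoop, pvSpanNum]
  | cons c rest ih =>
    intro hI num idx
    by_cases hc : c.isDigit
    · simp [pvALoop, pvSpanNum, hc, ih]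
    · simp [pvALoop, pvSpanNum, hc]

-- before the first digit, A just walks forward; at the first digit it records idx
lemma pvALoop_false (cs : List Char) : ∀ (hI : Int) (idx : Int),
    pvALoop cs hI [] false idx =
      (if (pvSpanHead cs).2 = [] then hI else idx + ((pvSpanHead cs).1.length : Int),
       pvSpanNum (pvSpanHead cs).2) := by
  induction cs with
  | nil => intro hI idx; simp [pvALoop, pvSpanHead, pvSpanNum]
  | cons c rest ih =>
    intro hI idx
    by_cases hc : c.isDigit
    · simp [pvALoop, pvSpanHead, hc, pvALoop_true, pvSpanNum]
    · have h1 : pvALoop (c :: rest) hI [] false idx = pvALoop rest hI [] false (idx + 1) := by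
        simp [pvALoop, hc]
      rw [h1, ih hI (idx + 1)]
      simp only [pvSpanHead, hc, Bool.not_eq_eq_eq_not, Bool.not_true, if_pos]
      by_cases hr : (pvSpanHead rest).2 = [] <;> simp [hr] <;> omega

-- pvSpanHead is takeWhile/dropWhile of "not a digit"
lemma pvSpanHead_eq (cs : List Char) :
    pvSpanHead cs = (cs.takeWhile (fun c => !c.isDigit), cs.dropWhile (fun c => !c.isDigit)) := by
  induction cs with
  | nil => simp [pvSpanHead]
  | cons c rest ih =>
    by_cases hc : c.isDigit <;> simp [pvSpanHead, hc, ih, List.takeWhile, List.dropWhile]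

lemma pvSpanHead_snd_ne_nil (cs : List Char) (h : cs.any Char.isDigit = true) :
    (pvSpanHead cs).2 ≠ [] := by
  rw [pvSpanHead_eq]
  simp only
  intro hnil
  have := List.takeWhile_append_dropWhile (p := fun c => !c.isDigit) (l := cs)
  rw [hnil, List.append_nil] at this
  rw [← this] at h
  simp only [List.any_eq_true] at h
  obtain ⟨x, hx, hdx⟩ := h
  have := List.mem_takeWhile_imp hx
  simp [hdx] at this

lemma take_length_takeWhile (cs : List Char) (p : Char → Bool) :
    cs.take ((cs.takeWhile p).length) = cs.takeWhile p := by
  induction cs with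
  | nil => simp
  | cons c rest ih => by_cases hc : p c <;> simp [List.takeWhile, hc, ih]

-- ===== VERDICT (by name: the statement is the Claim_ definition above) =====
theorem getHeadAndNumber_spec : Claim_equal_getHeadAndNumber := by
  intro s _ hpre
  unfold Spec_getHeadAndNumber getHeadAndNumber getHeadAndNumber_alt
  have hr := pvSpanHead_snd_ne_nil s.toList hpre
  rw [pvALoop_false s.toList (-1) 0, if_neg hr]
  have htk : PySem.List.slice s.toList (some 0) (some ((pvSpanHead s.toList).1.length : Int))
      = (pvSpanHead s.toList).1 := by
    rw [PySem.List.slice_zero_start, PySem.List.slice_to_natCast, pvSpanHead_eq]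
    exact take_length_takeWhile s.toList _
  simp only [zero_add] at htk ⊢
  rw [htk]
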